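-- pv_equiv track=rewrite | github.com/JSHectorM/Simulacion-Red | main.py | ruido
-- ===== SOURCE A (Python) =====
-- def ruido(cadena):
--     i = 7
--     cadRuido = ""
--     bloque = int((len(cadena))/8)
--     for j in range(bloque):
--         cadena2 = cadena[i-7:i]
--         if(cadena[i] == "0"):
--             cadena2 = cadena2 + "1"
--             cadRuido = cadRuido + cadena2
--         else:
--             cadena2 = cadena2 + "0"
--             cadRuido = cadRuido + cadena2
--         i = i+8
--
--     if ((len(cadena)) % 8 != 0):
--         cadena2 = cadena[i-7:len(cadena)]
--         cadRuido = cadRuido + cadena2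
--     return cadRuido
-- ===== SOURCE B (Python) =====
-- def ruido(cadena):
--     s = list(cadena)
--     for idx in range(7, len(cadena) // 8 * 8, 8):
--         s[idx] = '1' if s[idx] == '0' else '0'
--     return ''.join(s)
-- ===== Notes on version B (the rewrite author's own statement) =====
-- stated objective: simpler
-- what changed: Instead of rebuilding the string block by block with slices, concatenations and a separate remainder branch, B converts to a char list once and flips in place only the 8th character of each full byte (indices 7, 15, ...), so the partial tail needs no special case.
import Mathlib
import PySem

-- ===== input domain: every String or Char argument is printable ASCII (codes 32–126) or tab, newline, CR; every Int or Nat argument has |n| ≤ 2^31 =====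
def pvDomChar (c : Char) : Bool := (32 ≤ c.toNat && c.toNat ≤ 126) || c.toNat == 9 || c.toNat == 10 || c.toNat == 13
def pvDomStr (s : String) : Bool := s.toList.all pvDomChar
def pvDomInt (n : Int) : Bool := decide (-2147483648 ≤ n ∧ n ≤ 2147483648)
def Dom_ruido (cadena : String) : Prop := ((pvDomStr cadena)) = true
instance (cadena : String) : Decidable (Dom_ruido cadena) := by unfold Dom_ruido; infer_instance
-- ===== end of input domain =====

-- B flips in place only the 8th char of each full byte (one pass over a char list), replacing A's
-- slice-and-concatenate block loop with its separate remainder branch; return values proved equal.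

-- ===== PORT A =====
-- A's loop body, one iteration: state (i, cadRuido).  cadena[i] is always in range inside the
-- loop (i < 8*bloque ≤ len), so the total pyGetD is exact here.
def ruidoStepA (l : List Char) (st : Int × List Char) : Int × List Char :=
  if PySem.List.pyGetD l st.1 ' ' = '0' then
    (st.1 + 8, st.2 ++ (PySem.List.slice l (some (st.1 - 7)) (some st.1) ++ ['1']))
  else
    (st.1 + 8, st.2 ++ (PySem.List.slice l (some (st.1 - 7)) (some st.1) ++ ['0']))

-- the trailing partial-byte branch after the loop (len(cadena) % 8 on a nonnegative length:
-- Lean's Int % agrees with Python's % here)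
def ruidoTail (l : List Char) (st : Int × List Char) : List Char :=
  if (l.length : Int) % 8 ≠ 0 then
    st.2 ++ PySem.List.slice l (some (st.1 - 7)) (some (l.length : Int))
  else st.2

-- int(len(cadena)/8): float division then truncation; exact as Nat division for any realizable
-- (nonnegative, < 2^53) length.
def ruido (cadena : String) : String :=
  String.ofList (ruidoTail cadena.toList
    ((PySem.List.pyRange 0 ((cadena.toList.length / 8 : Nat) : Int) 1).foldl
      (fun st _ => ruidoStepA cadena.toList st) (7, [])))

-- ===== PORT B =====
def flipBit (c : Char) : Char := if c = '0' then '1' else '0'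

-- every idx produced by the range is in bounds, so pyGetD/pySetD are exact here
def ruido_alt (cadena : String) : String :=
  String.ofList ((PySem.List.pyRange 7 ((cadena.toList.length / 8 * 8 : Nat) : Int) 8).foldl
    (fun s idx => PySem.List.pySetD s idx (flipBit (PySem.List.pyGetD s idx ' '))) cadena.toList)

-- ===== PRECONDITION & SPEC =====
def Spec_ruido (cadena : String) (out : String) : Prop := out = ruido_alt cadena
instance (cadena : String) (out : String) : Decidable (Spec_ruido cadena out) := by unfold Spec_ruido; infer_instance

-- ===== CLAIM (what is proved, stated in full; the proofs are below) =====
def Claim_equal_ruido : Prop := ∀ (cadena : String), Dom_ruido cadena → Spec_ruido cadena (ruido cadena)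

-- ===== LEMMAS AND PROOFS =====

-- the common normal form: k processed blocks, then the untouched rest
def procChunks : Nat → List Char → List Char
  | 0, _ => []
  | k + 1, l => (l.take 7 ++ [flipBit (l.getD 7 ' ')]) ++ procChunks k (l.drop 8)

lemma foldl_const_iterate {σ : Type} (g : σ → σ) (xs : List Int) (s : σ) :
    xs.foldl (fun s _ => g s) s = g^[xs.length] s := by
  induction xs generalizing s with
  | nil => rfl
  | cons x xs ih => simp [List.foldl, ih, Function.iterate_succ_apply]

lemma getD_drop (l : List Char) (n k : Nat) :
    (l.drop n).getD k ' ' = l.getD (n + k) ' ' := by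
  simp [List.getD, List.getElem?_drop]

lemma stepA_eq (l : List Char) (m : Nat) (acc : List Char) :
    ruidoStepA l ((8 * (m : Int) + 7 : Int), acc)
      = ((8 * ((m + 1 : Nat) : Int) + 7 : Int),
         acc ++ ((l.drop (8 * m)).take 7 ++ [flipBit ((l.drop (8 * m)).getD 7 ' ')])) := by
  have h1 : (8 * (m : Int) + 7) - 7 = ((8 * m : Nat) : Int) := by push_cast; ring
  have h2 : (8 * (m : Int) + 7 : Int) = ((8 * m : Nat) : Int) + ((7 : Nat) : Int) := by push_cast; ring
  have h3 : (8 * (m : Int) + 7 : Int) = (((8 * m + 7 : Nat)) : Int) := by push_cast; ring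
  have h4 : (8 * (m : Int) + 7) + 8 = 8 * ((m + 1 : Nat) : Int) + 7 := by push_cast; ring
  have hsl : PySem.List.slice l (some ((8 * (m : Int) + 7) - 7)) (some (8 * (m : Int) + 7))
      = (l.drop (8 * m)).take 7 := by
    rw [h1]
    conv_lhs => rw [h2]
    rw [PySem.List.slice_natCast_add]
  have hg : PySem.List.pyGetD l (8 * (m : Int) + 7) ' ' = (l.drop (8 * m)).getD 7 ' ' := by
    rw [h3, PySem.List.pyGetD_natCast, getD_drop]
  unfold ruidoStepA flipBit
  simp only [hg, hsl, h4]
  split_ifs <;> rfl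

lemma iterA (l : List Char) :
    ∀ (k m : Nat) (acc : List Char), 8 * (m + k) ≤ l.length →
      (ruidoStepA l)^[k] ((8 * (m : Int) + 7 : Int), acc)
        = ((8 * ((m + k : Nat) : Int) + 7 : Int), acc ++ procChunks k (l.drop (8 * m))) := by
  intro k
  induction k with
  | zero => intro m acc _; simp [procChunks]
  | succ k ih =>
      intro m acc h
      rw [Function.iterate_succ_apply, stepA_eq l m acc]
      rw [ih (m + 1) _ (by omega)]
      simp only [Prod.mk.injEq]
      refine ⟨by push_cast; ring, ?_⟩
      simp only [procChunks, List.drop_drop, List.append_assoc]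
      have hd : 8 * (m + 1) = 8 * m + 8 := by omega
      rw [hd]

-- B's fold over the shifted index list, with an already-processed prefix p
lemma setFold (k : Nat) :
    ∀ (p t : List Char), 8 * k ≤ t.length →
      ((List.range k).map (fun m => ((p.length + (8 * m + 7) : Nat) : Int))).foldl
          (fun s idx => PySem.List.pySetD s idx (flipBit (PySem.List.pyGetD s idx ' '))) (p ++ t)
        = p ++ procChunks k t ++ t.drop (8 * k) := by
  induction k with
  | zero => intro p t _; simp [procChunks]
  | succ k ih =>
      intro p t h
      rw [List.range_succ_eq_map, List.map_cons, List.foldl_cons]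
      have hlt : 7 < t.length := by omega
      have hget : PySem.List.pyGetD (p ++ t) ((p.length + (8 * 0 + 7) : Nat) : Int) ' '
          = t.getD 7 ' ' := by
        rw [PySem.List.pyGetD_natCast]
        simp [List.getD, List.getElem?_append_right]
      have hset : PySem.List.pySetD (p ++ t) ((p.length + (8 * 0 + 7) : Nat) : Int)
            (flipBit (t.getD 7 ' '))
          = (p ++ t.take 7 ++ [flipBit (t.getD 7 ' ')]) ++ t.drop 8 := by
        rw [PySem.List.pySetD_natCast]
        rw [List.set_append_right _ _ (by omega)]
        simp only [Nat.mul_zero, Nat.zero_add, Nat.add_sub_cancel_left]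
        rw [List.set_eq_take_append_cons_drop]
        simp [hlt, List.append_assoc]
      rw [hget, hset]
      have hmap : (List.map (fun m => ((p.length + (8 * m + 7) : Nat) : Int))
              (List.map Nat.succ (List.range k)))
          = (List.range k).map
              (fun m => (((p ++ t.take 7 ++ [flipBit (t.getD 7 ' ')]).length + (8 * m + 7) : Nat) : Int)) := by
        simp only [List.map_map]
        apply List.map_congr_left
        intro m _
        simp only [Function.comp_apply, List.length_append, List.length_take,
          List.length_singleton, Nat.succ_eq_add_one]
        congr 1
        have hmin : min 7 t.length = 7 := by omega
        omega
      rw [hmap, ih _ (t.drop 8) (by rw [List.length_drop]; omega)]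
      simp only [procChunks, List.drop_drop, List.append_assoc]
      have hd : 8 + 8 * k = 8 * k + 8 := by omega
      have hd2 : 8 * (k + 1) = 8 * k + 8 := by omega
      rw [hd, hd2]

lemma pyRange_step8 (full : Nat) :
    PySem.List.pyRange 7 ((full * 8 : Nat) : Int) 8
      = (List.range full).map (fun m => ((8 * m + 7 : Nat) : Int)) := by
  rw [PySem.List.pyRange_of_pos _ _ (by norm_num)]
  have hcount : (if (7 : Int) < ((full * 8 : Nat) : Int)
      then ((((full * 8 : Nat) : Int) - 7 + 8 - 1) / 8).toNat else 0) = full := by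
    split_ifs with h
    · have heq : (((full * 8 : Nat) : Int) - 7 + 8 - 1) = 8 * full := by push_cast; ring
      rw [heq, Int.mul_ediv_cancel_left _ (by norm_num)]
      simp
    · push_cast at h
      omega
  rw [hcount]
  apply List.map_congr_left
  intro m _
  push_cast
  ring

-- both ports compute procChunks (len/8) l ++ the untouched tail
lemma ruido_eq_norm (cadena : String) :
    ruido cadena
      = String.ofList (procChunks (cadena.toList.length / 8) cadena.toList
          ++ cadena.toList.drop (8 * (cadena.toList.length / 8))) := by
  unfold ruido
  congr 1
  rw [foldl_const_iterate, PySem.List.length_pyRange_one]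
  have hlen : ((cadena.toList.length / 8 : Nat) : Int) - 0 = ((cadena.toList.length / 8 : Nat) : Int) := by ring
  rw [hlen, Int.toNat_natCast]
  have h7 : ((7 : Int), ([] : List Char)) = ((8 * ((0 : Nat) : Int) + 7 : Int), ([] : List Char)) := by norm_num
  rw [h7, iterA cadena.toList (cadena.toList.length / 8) 0 [] (by omega)]
  unfold ruidoTail
  simp only [Nat.zero_add, List.nil_append, Nat.mul_zero, List.drop_zero]
  set l := cadena.toList with hl
  set bloque : Nat := l.length / 8 with hb
  by_cases hmod : (l.length : Int) % 8 ≠ 0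
  · rw [if_pos hmod]
    congr 1
    have h1 : (8 * ((bloque : Nat) : Int) + 7) - 7 = ((8 * bloque : Nat) : Int) := by push_cast; ring
    rw [h1, PySem.List.slice_natCast]
    rw [List.take_of_length_le (by rw [List.length_drop])]
  · rw [if_neg hmod]
    have h0 : 8 * bloque = l.length := by
      simp only [not_not] at hmod
      have hm : l.length % 8 = 0 := by omega
      omega
    rw [h0]
    simp

lemma ruido_alt_eq_norm (cadena : String) :
    ruido_alt cadena
      = String.ofList (procChunks (cadena.toList.length / 8) cadena.toList
          ++ cadena.toList.drop (8 * (cadena.toList.length / 8))) := by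
  unfold ruido_alt
  congr 1
  rw [pyRange_step8 (cadena.toList.length / 8)]
  have hsf := setFold (cadena.toList.length / 8) [] cadena.toList (by omega)
  simp only [List.length_nil, Nat.zero_add, List.nil_append] at hsf
  rw [hsf]

-- ===== VERDICT (by name: the statement is the Claim_ definition above) =====
theorem ruido_spec : Claim_equal_ruido := by
  intro cadena _
  unfold Spec_ruido
  rw [ruido_eq_norm, ruido_alt_eq_norm]
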